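-- pv_equiv track=rewrite | github.com/Periaraperi/AOC | 2024/13/part1.py | solve
-- ===== SOURCE A (Python) =====
-- def solve(info):
--     max_button_presses = 100
--     infinity = max_button_presses*max_button_presses
--     answer = 0
--     for i in info:
--         button_a = i[0]
--         button_b = i[1]
--         prize = i[2]
--
--         tokens = infinity
--         for n in range(max_button_presses+1):
--             for m in range(max_button_presses+1):
--                 if button_a[0]*n + button_b[0]*m == prize[0] and\
--                    button_a[1]*n + button_b[1]*m == prize[1]:
--                     tokens = min(tokens, (3*n + m))
--
--         if tokens != infinity:
--             answer += tokens
--     return answer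
-- ===== SOURCE B (Python) =====
-- def solve(info):
--     answer = 0
--     for a, b, p in info:
--         ax, bx, px = a[0], b[0], p[0]
--         if len(a) < 2 or len(b) < 2 or len(p) < 2:
--             continue  # no y-coordinate: this machine cannot be solved
--         ay, by, py = a[1], b[1], p[1]
--         det = ax * by - ay * bx
--         if det != 0:
--             # Cramer's rule: the unique rational solution of the 2x2 system
--             n, rn = divmod(px * by - py * bx, det)
--             m, rm = divmod(ax * py - ay * px, det)
--             if rn == 0 and rm == 0 and 0 <= n <= 100 and 0 <= m <= 100:
--                 answer += 3 * n + m
--         else: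
--             # singular system: scan the A-press count, solve for the B-press count
--             best = None
--             for n in range(101):
--                 rx, ry = px - ax * n, py - ay * n
--                 if bx != 0:
--                     m, r = divmod(rx, bx)
--                     if r or by * m != ry:
--                         continue
--                 elif by != 0:
--                     if rx != 0:
--                         continue
--                     m, r = divmod(ry, by)
--                     if r:
--                         continue
--                 else:
--                     if rx or ry:
--                         continue
--                     m = 0
--                 if 0 <= m <= 100:
--                     t = 3 * n + m
--                     if best is None or t < best:
--                         best = t
--             if best is not None:
--                 answer += best
--     return answer
-- ===== Notes on version B (the rewrite author's own statement) =====
-- stated objective: faster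
-- what changed: Replaces A's 101x101 brute-force scan per machine by Cramer's rule on the 2x2 linear system (divisibility + 0..100 range checks), with a single 0..100 scan over the A-press count only when the determinant is zero; B also skips machines whose coordinate lists are missing an entry, so Pre_ excludes only inputs where A raises IndexError.
import Mathlib
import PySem

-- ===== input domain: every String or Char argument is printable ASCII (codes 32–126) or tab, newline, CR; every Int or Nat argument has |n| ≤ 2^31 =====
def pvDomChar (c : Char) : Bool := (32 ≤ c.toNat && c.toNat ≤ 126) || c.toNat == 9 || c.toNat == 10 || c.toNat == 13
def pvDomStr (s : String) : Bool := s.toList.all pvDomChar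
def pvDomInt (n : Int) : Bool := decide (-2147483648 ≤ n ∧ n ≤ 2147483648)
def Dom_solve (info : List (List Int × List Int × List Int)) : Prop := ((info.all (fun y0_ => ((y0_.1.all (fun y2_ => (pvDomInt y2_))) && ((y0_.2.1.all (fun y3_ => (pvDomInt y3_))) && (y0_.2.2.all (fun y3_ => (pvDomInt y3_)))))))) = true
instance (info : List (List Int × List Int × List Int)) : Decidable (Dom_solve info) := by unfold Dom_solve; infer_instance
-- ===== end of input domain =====

-- B replaces A's 101×101 brute-force search per machine by Cramer's rule on the 2×2
-- system (with a single 0..100 scan only when the system is singular); objective: faster.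

-- ===== PORT A =====
def solve (info : List (List Int × List Int × List Int)) : Int :=
  info.foldl (fun answer i =>
    let button_a := i.1
    let button_b := i.2.1
    let prize := i.2.2
    let tokens :=
      (PySem.List.pyRange 0 101 1).foldl (fun t n =>
        (PySem.List.pyRange 0 101 1).foldl (fun t m =>
          if PySem.List.pyGetD button_a 0 0 * n + PySem.List.pyGetD button_b 0 0 * m = PySem.List.pyGetD prize 0 0 ∧
             PySem.List.pyGetD button_a 1 0 * n + PySem.List.pyGetD button_b 1 0 * m = PySem.List.pyGetD prize 1 0
          then min t (3 * n + m) else t) t) 10000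
    if tokens ≠ 10000 then answer + tokens else answer) 0

-- ===== PORT B =====
-- singular case of Source B: scan the A-press count n, solve for the B-press count m
def degenTokens (ax ay bx byy px py : Int) : Option Int :=
  (PySem.List.pyRange 0 101 1).foldl (fun best n =>
    let rx := px - ax * n
    let ry := py - ay * n
    let cand : Option Int :=
      if bx ≠ 0 then
        if PySem.Int.mod rx bx = 0 ∧ byy * PySem.Int.floordiv rx bx = ry then
          some (PySem.Int.floordiv rx bx) else none
      else if byy ≠ 0 then
        if rx = 0 ∧ PySem.Int.mod ry byy = 0 then some (PySem.Int.floordiv ry byy) else none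
      else if rx = 0 ∧ ry = 0 then some 0 else none
    match cand with
    | some m =>
      if 0 ≤ m ∧ m ≤ 100 then
        match best with
        | none => some (3 * n + m)
        | some b => if 3 * n + m < b then some (3 * n + m) else some b
      else best
    | none => best) none

def solve_alt (info : List (List Int × List Int × List Int)) : Int :=
  info.foldl (fun answer i =>
    let ax := PySem.List.pyGetD i.1 0 0
    let bx := PySem.List.pyGetD i.2.1 0 0
    let px := PySem.List.pyGetD i.2.2 0 0
    if i.1.length < 2 ∨ i.2.1.length < 2 ∨ i.2.2.length < 2 then answer
    else
    let ay := PySem.List.pyGetD i.1 1 0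
    let byy := PySem.List.pyGetD i.2.1 1 0
    let py := PySem.List.pyGetD i.2.2 1 0
    if ax * byy - ay * bx ≠ 0 then
      if PySem.Int.mod (px * byy - py * bx) (ax * byy - ay * bx) = 0 ∧
         PySem.Int.mod (ax * py - ay * px) (ax * byy - ay * bx) = 0 ∧
         0 ≤ PySem.Int.floordiv (px * byy - py * bx) (ax * byy - ay * bx) ∧
         PySem.Int.floordiv (px * byy - py * bx) (ax * byy - ay * bx) ≤ 100 ∧
         0 ≤ PySem.Int.floordiv (ax * py - ay * px) (ax * byy - ay * bx) ∧
         PySem.Int.floordiv (ax * py - ay * px) (ax * byy - ay * bx) ≤ 100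
      then answer + (3 * PySem.Int.floordiv (px * byy - py * bx) (ax * byy - ay * bx) +
                     PySem.Int.floordiv (ax * py - ay * px) (ax * byy - ay * bx))
      else answer
    else
      match degenTokens ax ay bx byy px py with
      | some t => answer + t
      | none => answer) 0

-- ===== PRECONDITION & SPEC =====
-- Pre_ is exactly A's domain: every coordinate list is nonempty, and the y-coordinates
-- (index 1) exist whenever the x-equation has a solution in the 0..100 box (A's `and`
-- short-circuits, so a[1]/b[1]/p[1] are only read when the x-equation matches; outside
-- Pre_ the Python A raises IndexError).
def Pre_solve (info : List (List Int × List Int × List Int)) : Prop :=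
  ∀ i ∈ info,
    1 ≤ i.1.length ∧ 1 ≤ i.2.1.length ∧ 1 ≤ i.2.2.length ∧
    ((2 ≤ i.1.length ∧ 2 ≤ i.2.1.length ∧ 2 ≤ i.2.2.length) ∨
      ∀ n ∈ PySem.List.pyRange 0 101 1, ∀ m ∈ PySem.List.pyRange 0 101 1,
        PySem.List.pyGetD i.1 0 0 * n + PySem.List.pyGetD i.2.1 0 0 * m ≠
          PySem.List.pyGetD i.2.2 0 0)
instance (info : List (List Int × List Int × List Int)) : Decidable (Pre_solve info) := by
  unfold Pre_solve; infer_instance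

def pvWitness_solve : (List (List Int × List Int × List Int)) :=
  [([94, 34], [22, 67], [8400, 5400]), ([26, 66], [67, 21], [12748, 12176])]

def Spec_solve (info : List (List Int × List Int × List Int)) (out : Int) : Prop := out = solve_alt info
instance (info : List (List Int × List Int × List Int)) (out : Int) : Decidable (Spec_solve info out) := by unfold Spec_solve; infer_instance

-- ===== CLAIM (what is proved, stated in full; the proofs are below) =====
def Claim_equal_solve : Prop := ∀ (info : List (List Int × List Int × List Int)), Dom_solve info → Pre_solve info → Spec_solve info (solve info)

-- ===== LEMMAS AND PROOFS =====

lemma pv_foldl_ext {α β : Type} (L : List β) (f g : α → β → α) (t : α)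
    (h : ∀ (a : α) (x : β), x ∈ L → f a x = g a x) : L.foldl f t = L.foldl g t := by
  induction L generalizing t with
  | nil => rfl
  | cons y ys ih =>
    simp only [List.foldl_cons]
    rw [h t y (by simp)]
    exact ih _ (fun a x hx => h a x (by simp [hx]))

lemma pv_foldl_id {α : Type} (L : List Int) (t : α) :
    L.foldl (fun a _ => a) t = t := by
  induction L generalizing t with
  | nil => rfl
  | cons y ys ih => exact ih t

lemma pv_foldl_if_none {α : Type} (L : List Int) (c : Int → Prop) [DecidablePred c]
    (f : α → Int → α) (t : α) (h : ∀ x ∈ L, ¬ c x) :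
    L.foldl (fun a x => if c x then f a x else a) t = t := by
  induction L generalizing t with
  | nil => rfl
  | cons y ys ih =>
    rw [List.foldl_cons, if_neg (h y (by simp))]
    exact ih t (fun x hx => h x (by simp [hx]))

lemma pv_foldl_if_unique {α : Type} (L : List Int) (c : Int → Prop) [DecidablePred c]
    (f : α → Int → α) (t : α) (x0 : Int) (hnd : L.Nodup) (hmem : x0 ∈ L)
    (h : ∀ x ∈ L, c x ↔ x = x0) :
    L.foldl (fun a x => if c x then f a x else a) t = f t x0 := by
  induction L generalizing t with
  | nil => cases hmem
  | cons y ys ih =>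
    rcases List.mem_cons.mp hmem with hy | hy
    · subst hy
      rw [List.foldl_cons, if_pos ((h x0 (by simp)).mpr rfl)]
      refine pv_foldl_if_none ys c f (f t x0) (fun x hx hcx => ?_)
      have hxy : x = x0 := (h x (by simp [hx])).mp hcx
      subst hxy
      exact (List.nodup_cons.mp hnd).1 hx
    · have hyne : ¬ c y := fun hcy => by
        have hyx : y = x0 := (h y (by simp)).mp hcy
        subst hyx
        exact (List.nodup_cons.mp hnd).1 hy
      rw [List.foldl_cons, if_neg hyne]
      exact ih t (List.nodup_cons.mp hnd).2 hy (fun x hx => h x (List.mem_cons_of_mem _ hx))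

lemma pv_foldl_min_const (L : List Int) (g : Int → Int) (t v : Int)
    (h : ∀ x ∈ L, v ≤ g x) :
    L.foldl (fun a x => min a (g x)) (min t v) = min t v := by
  induction L with
  | nil => rfl
  | cons y ys ih =>
    have hy : min (min t v) (g y) = min t v := by
      have := h y (by simp)
      omega
    rw [List.foldl_cons, hy]
    exact ih (fun x hx => h x (by simp [hx]))

lemma pv_foldl_optrel {β : Type} (L : List β) (fA : Int → β → Int)
    (fB : Option Int → β → Option Int) (o : Option Int)
    (h : ∀ (o' : Option Int) (x : β), x ∈ L → fA (o'.getD 10000) x = (fB o' x).getD 10000) :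
    L.foldl fA (o.getD 10000) = (L.foldl fB o).getD 10000 := by
  induction L generalizing o with
  | nil => rfl
  | cons y ys ih =>
    simp only [List.foldl_cons]
    rw [h o y (by simp)]
    exact ih (fB o y) (fun o' x hx => h o' x (by simp [hx]))

lemma pv_min_getD (o : Option Int) (v : Int) (hv : v ≤ 10000) :
    min (o.getD 10000) v = (match o with
      | none => some v
      | some tk => if v < tk then some v else some tk).getD 10000 := by
  cases o with
  | none =>
    simp only [Option.getD, min_def]
    split_ifs <;> omega
  | some tk =>
    simp only [Option.getD, min_def]
    split_ifs <;> simp only [Option.getD] <;> omega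

lemma pv_exact_div (a b : Int) (h : PySem.Int.mod a b = 0) :
    b * PySem.Int.floordiv a b = a := by
  have hfm := PySem.Int.floordiv_mul_add_mod a b
  rw [h] at hfm
  linear_combination hfm

-- the singular-case equality: A's double loop equals B's degenTokens (via the 10000 sentinel)
lemma pv_machine_degen (ax ay bx byy px py : Int) :
    (PySem.List.pyRange 0 101 1).foldl (fun t n =>
      (PySem.List.pyRange 0 101 1).foldl (fun t m =>
        if ax * n + bx * m = px ∧ ay * n + byy * m = py then min t (3 * n + m) else t) t) 10000
    = (degenTokens ax ay bx byy px py).getD 10000 := by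
  have hnd : (PySem.List.pyRange 0 101 1).Nodup := PySem.List.nodup_pyRange_one 0 101
  have hmem : ∀ x : Int, x ∈ PySem.List.pyRange 0 101 1 ↔ 0 ≤ x ∧ x < 101 := fun x =>
    PySem.List.mem_pyRange_one
  rw [degenTokens, show (10000 : Int) = (none : Option Int).getD 10000 from rfl]
  refine pv_foldl_optrel _ _ _ none (fun o n hn => ?_)
  dsimp only
  have hnR : 0 ≤ n ∧ n < 101 := (hmem n).mp hn
  have hcond : ∀ m : Int, (ax * n + bx * m = px ∧ ay * n + byy * m = py) ↔
      (bx * m = px - ax * n ∧ byy * m = py - ay * n) := by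
    intro m
    constructor <;> rintro ⟨h1, h2⟩ <;> exact ⟨by linarith, by linarith⟩
  by_cases hbx : bx ≠ 0
  · rw [if_pos hbx]
    by_cases hg : PySem.Int.mod (px - ax * n) bx = 0 ∧
        byy * PySem.Int.floordiv (px - ax * n) bx = py - ay * n
    · rw [if_pos hg]
      dsimp only
      set q := PySem.Int.floordiv (px - ax * n) bx with hqdef
      have hq : bx * q = px - ax * n := by rw [hqdef]; exact pv_exact_div _ _ hg.1
      have huniq : ∀ m : Int, (ax * n + bx * m = px ∧ ay * n + byy * m = py) ↔ m = q := by
        intro m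
        rw [hcond m]
        constructor
        · rintro ⟨h1, _⟩
          exact mul_left_cancel₀ hbx (h1.trans hq.symm)
        · rintro rfl
          exact ⟨hq, hg.2⟩
      by_cases hr : 0 ≤ q ∧ q ≤ 100
      · rw [if_pos hr]
        rw [pv_foldl_if_unique _ _ (fun a m => min a (3 * n + m)) _ q hnd
            ((hmem q).mpr (by omega)) (fun m _ => huniq m)]
        exact pv_min_getD o (3 * n + q) (by omega)
      · rw [if_neg hr]
        rw [pv_foldl_if_none _ _ (fun a m => min a (3 * n + m)) _ (fun m hm hc => by
          have hmq : m = q := (huniq m).mp hc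
          have hmR := (hmem m).mp hm
          subst hmq
          exact hr (by omega))]
    · rw [if_neg hg]
      rw [pv_foldl_if_none _ _ (fun a m => min a (3 * n + m)) _ (fun m _ hc => by
        obtain ⟨h1, h2⟩ := (hcond m).mp hc
        have hdv : PySem.Int.mod (px - ax * n) bx = 0 :=
          (PySem.Int.mod_eq_zero_iff_dvd _ _).mpr ⟨m, h1.symm⟩
        have hq : bx * PySem.Int.floordiv (px - ax * n) bx = px - ax * n :=
          pv_exact_div _ _ hdv
        have hmq : PySem.Int.floordiv (px - ax * n) bx = m :=
          mul_left_cancel₀ hbx (hq.trans h1.symm)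
        exact hg ⟨hdv, by rw [hmq]; exact h2⟩)]
  · rw [if_neg hbx]
    push Not at hbx
    by_cases hby : byy ≠ 0
    · rw [if_pos hby]
      by_cases hg : px - ax * n = 0 ∧ PySem.Int.mod (py - ay * n) byy = 0
      · rw [if_pos hg]
        dsimp only
        set q := PySem.Int.floordiv (py - ay * n) byy with hqdef
        have hq : byy * q = py - ay * n := by rw [hqdef]; exact pv_exact_div _ _ hg.2
        have huniq : ∀ m : Int, (ax * n + bx * m = px ∧ ay * n + byy * m = py) ↔ m = q := by
          intro m
          rw [hcond m, hbx]
          constructor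
          · rintro ⟨_, h2⟩
            exact mul_left_cancel₀ hby (h2.trans hq.symm)
          · rintro rfl
            exact ⟨by have := hg.1; omega, hq⟩
        by_cases hr : 0 ≤ q ∧ q ≤ 100
        · rw [if_pos hr]
          rw [pv_foldl_if_unique _ _ (fun a m => min a (3 * n + m)) _ q hnd
              ((hmem q).mpr (by omega)) (fun m _ => huniq m)]
          exact pv_min_getD o (3 * n + q) (by omega)
        · rw [if_neg hr]
          rw [pv_foldl_if_none _ _ (fun a m => min a (3 * n + m)) _ (fun m hm hc => by
            have hmq : m = q := (huniq m).mp hc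
            have hmR := (hmem m).mp hm
            subst hmq
            exact hr (by omega))]
      · rw [if_neg hg]
        rw [pv_foldl_if_none _ _ (fun a m => min a (3 * n + m)) _ (fun m _ hc => by
          obtain ⟨h1, h2⟩ := (hcond m).mp hc
          rw [hbx] at h1
          exact hg ⟨by omega, (PySem.Int.mod_eq_zero_iff_dvd _ _).mpr ⟨m, h2.symm⟩⟩)]
    · rw [if_neg hby]
      push Not at hby
      by_cases hg : px - ax * n = 0 ∧ py - ay * n = 0
      · rw [if_pos hg]
        dsimp only
        rw [if_pos (by norm_num : (0 : Int) ≤ 0 ∧ (0 : Int) ≤ 100)]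
        have hall :
            (PySem.List.pyRange 0 101 1).foldl (fun a m =>
              if ax * n + bx * m = px ∧ ay * n + byy * m = py then min a (3 * n + m) else a)
              (o.getD 10000)
            = min (o.getD 10000) (3 * n + 0) := by
          rw [pv_foldl_ext _ _ (fun a m => min a (3 * n + m)) _ (fun a m _ => by
            rw [if_pos (by rw [hcond m, hbx, hby]; constructor <;> omega)]),
            PySem.List.pyRange_one_cons (by norm_num)]
          rw [List.foldl_cons]
          exact pv_foldl_min_const _ (fun m => 3 * n + m) (o.getD 10000) (3 * n + 0)
            (fun m hm => by
              have := PySem.List.mem_pyRange_one.mp hm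
              show (3 * n + 0 : Int) ≤ 3 * n + m
              omega)
        rw [hall]
        exact pv_min_getD o (3 * n + 0) (by omega)
      · rw [if_neg hg]
        rw [pv_foldl_if_none _ _ (fun a m => min a (3 * n + m)) _ (fun m _ hc => by
          obtain ⟨h1, h2⟩ := (hcond m).mp hc
          rw [hbx] at h1
          rw [hby] at h2
          exact hg ⟨by omega, by omega⟩)]

-- the regular-case equality: A's double loop equals the Cramer's-rule answer
lemma pv_machine_cramer (ax ay bx byy px py : Int) (hdet : ax * byy - ay * bx ≠ 0) :
    (PySem.List.pyRange 0 101 1).foldl (fun t n =>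
      (PySem.List.pyRange 0 101 1).foldl (fun t m =>
        if ax * n + bx * m = px ∧ ay * n + byy * m = py then min t (3 * n + m) else t) t) 10000
    = (if PySem.Int.mod (px * byy - py * bx) (ax * byy - ay * bx) = 0 ∧
          PySem.Int.mod (ax * py - ay * px) (ax * byy - ay * bx) = 0 ∧
          0 ≤ PySem.Int.floordiv (px * byy - py * bx) (ax * byy - ay * bx) ∧
          PySem.Int.floordiv (px * byy - py * bx) (ax * byy - ay * bx) ≤ 100 ∧
          0 ≤ PySem.Int.floordiv (ax * py - ay * px) (ax * byy - ay * bx) ∧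
          PySem.Int.floordiv (ax * py - ay * px) (ax * byy - ay * bx) ≤ 100
       then 3 * PySem.Int.floordiv (px * byy - py * bx) (ax * byy - ay * bx) +
            PySem.Int.floordiv (ax * py - ay * px) (ax * byy - ay * bx)
       else 10000) := by
  have hnd : (PySem.List.pyRange 0 101 1).Nodup := PySem.List.nodup_pyRange_one 0 101
  have hmem : ∀ x : Int, x ∈ PySem.List.pyRange 0 101 1 ↔ 0 ≤ x ∧ x < 101 := fun x =>
    PySem.List.mem_pyRange_one
  set det := ax * byy - ay * bx with hdetdef
  set X := px * byy - py * bx with hXdef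
  set Y := ax * py - ay * px with hYdef
  set n0 := PySem.Int.floordiv X det with hn0def
  set m0 := PySem.Int.floordiv Y det with hm0def
  have hchar : ∀ n m : Int, (ax * n + bx * m = px ∧ ay * n + byy * m = py) ↔
      (det * n = X ∧ det * m = Y) := by
    intro n m
    constructor
    · rintro ⟨h1, h2⟩
      constructor
      · rw [hdetdef, hXdef]; linear_combination byy * h1 - bx * h2
      · rw [hdetdef, hYdef]; linear_combination ax * h2 - ay * h1
    · rintro ⟨h1, h2⟩
      constructor
      · refine mul_left_cancel₀ hdet ?_
        rw [hdetdef, hXdef, hYdef] at *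
        linear_combination ax * h1 + bx * h2
      · refine mul_left_cancel₀ hdet ?_
        rw [hdetdef, hXdef, hYdef] at *
        linear_combination ay * h1 + byy * h2
  by_cases hc : PySem.Int.mod X det = 0 ∧ PySem.Int.mod Y det = 0 ∧
      0 ≤ n0 ∧ n0 ≤ 100 ∧ 0 ≤ m0 ∧ m0 ≤ 100
  · rw [if_pos hc]
    have hqn : det * n0 = X := by rw [hn0def]; exact pv_exact_div _ _ hc.1
    have hqm : det * m0 = Y := by rw [hm0def]; exact pv_exact_div _ _ hc.2.1
    have hstep : ∀ (a : Int) (n : Int), n ∈ PySem.List.pyRange 0 101 1 →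
        (PySem.List.pyRange 0 101 1).foldl (fun t m =>
          if ax * n + bx * m = px ∧ ay * n + byy * m = py then min t (3 * n + m) else t) a
        = if n = n0 then min a (3 * n0 + m0) else a := by
      intro a n _
      by_cases hnn : n = n0
      · rw [if_pos hnn]
        rw [pv_foldl_if_unique _ (fun m => ax * n + bx * m = px ∧ ay * n + byy * m = py)
            (fun t m => min t (3 * n + m)) _ m0 hnd
            ((hmem m0).mpr (by omega)) (fun m _ => by
              refine Iff.trans (hchar n m) ?_
              constructor
              · rintro ⟨_, h2⟩
                exact mul_left_cancel₀ hdet (h2.trans hqm.symm)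
              · rintro rfl
                exact ⟨by rw [hnn]; exact hqn, hqm⟩)]
        rw [hnn]
      · rw [if_neg hnn]
        exact pv_foldl_if_none _ (fun m => ax * n + bx * m = px ∧ ay * n + byy * m = py)
          (fun t m => min t (3 * n + m)) _ (fun m _ hcnm => by
          obtain ⟨h1, _⟩ := (hchar n m).mp hcnm
          exact hnn (mul_left_cancel₀ hdet (h1.trans hqn.symm)))
    rw [pv_foldl_ext _ _ (fun a n => if n = n0 then min a (3 * n0 + m0) else a) _ hstep]
    rw [pv_foldl_if_unique _ _ (fun a _ => min a (3 * n0 + m0)) _ n0 hnd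
        ((hmem n0).mpr (by omega)) (fun n _ => Iff.rfl)]
    omega
  · rw [if_neg hc]
    rw [pv_foldl_ext _ _ (fun a _ => a) _ (fun a n hn => by
      exact pv_foldl_if_none _ _ (fun t m => min t (3 * n + m)) _ (fun m hm hcnm => by
        obtain ⟨h1, h2⟩ := (hchar n m).mp hcnm
        have hdn : PySem.Int.mod X det = 0 :=
          (PySem.Int.mod_eq_zero_iff_dvd _ _).mpr ⟨n, h1.symm⟩
        have hdm : PySem.Int.mod Y det = 0 :=
          (PySem.Int.mod_eq_zero_iff_dvd _ _).mpr ⟨m, h2.symm⟩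
        have hqn : det * n0 = X := by rw [hn0def]; exact pv_exact_div _ _ hdn
        have hqm : det * m0 = Y := by rw [hm0def]; exact pv_exact_div _ _ hdm
        have hnn : n0 = n := mul_left_cancel₀ hdet (hqn.trans h1.symm)
        have hmm : m0 = m := mul_left_cancel₀ hdet (hqm.trans h2.symm)
        have hnR := (hmem n).mp hn
        have hmR := (hmem m).mp hm
        exact hc ⟨hdn, hdm, by omega, by omega, by omega, by omega⟩))]
    exact pv_foldl_id _ _

-- B's singular-case tokens are always between 0 and 400
lemma pv_degen_bound (ax ay bx byy px py : Int) :
    ∀ (L : List Int) (o : Option Int), (∀ x ∈ L, 0 ≤ x ∧ x < 101) →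
      (∀ v, o = some v → 0 ≤ v ∧ v ≤ 400) →
      ∀ v, (L.foldl (fun best n =>
        let rx := px - ax * n
        let ry := py - ay * n
        let cand : Option Int :=
          if bx ≠ 0 then
            if PySem.Int.mod rx bx = 0 ∧ byy * PySem.Int.floordiv rx bx = ry then
              some (PySem.Int.floordiv rx bx) else none
          else if byy ≠ 0 then
            if rx = 0 ∧ PySem.Int.mod ry byy = 0 then some (PySem.Int.floordiv ry byy) else none
          else if rx = 0 ∧ ry = 0 then some 0 else none
        match cand with
        | some m =>
          if 0 ≤ m ∧ m ≤ 100 then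
            match best with
            | none => some (3 * n + m)
            | some b => if 3 * n + m < b then some (3 * n + m) else some b
          else best
        | none => best) o) = some v → 0 ≤ v ∧ v ≤ 400 := by
  intro L
  induction L with
  | nil =>
    intro o _ ho v hv
    exact ho v hv
  | cons y ys ih =>
    intro o hL ho v hv
    rw [List.foldl_cons] at hv
    refine ih _ (fun x hx => hL x (by simp [hx])) ?_ v hv
    intro w hw
    have hy := hL y (by simp)
    dsimp only at hw
    split at hw
    · rename_i m hm
      split at hw
      · rename_i hmR
        cases o with
        | none =>
          dsimp only at hw
          obtain rfl : 3 * y + m = w := by injection hw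
          omega
        | some tk =>
          have htk := ho tk rfl
          dsimp only at hw
          split at hw
          · obtain rfl : 3 * y + m = w := by injection hw
            omega
          · obtain rfl : tk = w := by injection hw
            omega
      · exact ho w hw
    · exact ho w hw

lemma pv_machine_bound (ax ay bx byy px py t : Int)
    (h : degenTokens ax ay bx byy px py = some t) : 0 ≤ t ∧ t ≤ 400 := by
  rw [degenTokens] at h
  exact pv_degen_bound ax ay bx byy px py _ none
    (fun x hx => PySem.List.mem_pyRange_one.mp hx) (by simp) t h

-- ===== VERDICT (by name: the statement is the Claim_ definition above) =====
theorem solve_spec : Claim_equal_solve := by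
  intro info _ hpre
  unfold Spec_solve solve solve_alt
  refine pv_foldl_ext _ _ _ _ (fun a i hi => ?_)
  dsimp only
  obtain ⟨hl1, hl2, hl3, hdisj⟩ := hpre i hi
  by_cases hshort : i.1.length < 2 ∨ i.2.1.length < 2 ∨ i.2.2.length < 2
  · rw [if_pos hshort]
    have hun : ∀ n ∈ PySem.List.pyRange 0 101 1, ∀ m ∈ PySem.List.pyRange 0 101 1,
        PySem.List.pyGetD i.1 0 0 * n + PySem.List.pyGetD i.2.1 0 0 * m ≠
          PySem.List.pyGetD i.2.2 0 0 := by
      rcases hdisj with h | h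
      · exact absurd hshort (by omega)
      · exact h
    have htok : (PySem.List.pyRange 0 101 1).foldl (fun t n =>
        (PySem.List.pyRange 0 101 1).foldl (fun t m =>
          if PySem.List.pyGetD i.1 0 0 * n + PySem.List.pyGetD i.2.1 0 0 * m = PySem.List.pyGetD i.2.2 0 0 ∧
             PySem.List.pyGetD i.1 1 0 * n + PySem.List.pyGetD i.2.1 1 0 * m = PySem.List.pyGetD i.2.2 1 0
          then min t (3 * n + m) else t) t) 10000 = (10000 : Int) := by
      rw [pv_foldl_ext _ _ (fun t _ => t) _ (fun t n hn =>
        pv_foldl_if_none _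
          (fun m => PySem.List.pyGetD i.1 0 0 * n + PySem.List.pyGetD i.2.1 0 0 * m = PySem.List.pyGetD i.2.2 0 0 ∧
            PySem.List.pyGetD i.1 1 0 * n + PySem.List.pyGetD i.2.1 1 0 * m = PySem.List.pyGetD i.2.2 1 0)
          (fun t m => min t (3 * n + m)) _
          (fun m hm hc => hun n hn m hm hc.1))]
      exact pv_foldl_id _ _
    rw [htok, if_neg (fun h => h rfl)]
  · rw [if_neg hshort]
    by_cases hdet : PySem.List.pyGetD i.1 0 0 * PySem.List.pyGetD i.2.1 1 0 -
        PySem.List.pyGetD i.1 1 0 * PySem.List.pyGetD i.2.1 0 0 ≠ 0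
    · rw [if_pos hdet, pv_machine_cramer _ _ _ _ _ _ hdet]
      split_ifs with hc h1 h2
      · rfl
      · omega
      · exact absurd rfl h2
      · rfl
    · rw [if_neg hdet, pv_machine_degen]
      cases hmt : degenTokens (PySem.List.pyGetD i.1 0 0) (PySem.List.pyGetD i.1 1 0)
          (PySem.List.pyGetD i.2.1 0 0) (PySem.List.pyGetD i.2.1 1 0)
          (PySem.List.pyGetD i.2.2 0 0) (PySem.List.pyGetD i.2.2 1 0) with
      | none => simp
      | some t =>
        have := pv_machine_bound _ _ _ _ _ _ t hmt
        simp only [Option.getD, if_pos (by omega : (t : Int) ≠ 10000)]
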